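-- pv_equiv track=rewrite | github.com/gutsycoder/Important_DSA_Questions | MinimumPassesMatrix.py | convertNegatives
-- ===== SOURCE A (Python) =====
-- from collections import deque
--
-- def convertNegatives(matrix):
--     queue=deque(getAllPositivePositions(matrix))
--     passes=0
--     while queue:
--         currentSize=len(queue)
--         while currentSize>0:
--             currentRow,currentCol=queue.popleft()
--             neighbors=getNeighbors(currentRow,currentCol,matrix)
--             for neighbor in neighbors:
--                 row,col=neighbor
--                 value=matrix[row][col]
--                 if value<0:
--                     matrix[row][col]*=-1
--                     queue.append([row,col])
--             currentSize-=1
--         passes+=1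
--
--     return passes
--
-- def getAllPositivePositions(matrix):
--     positivePositions=[]
--     for row in range(len(matrix)):
--         for col in range(len(matrix[0])):
--             if matrix[row][col]>0:
--                 positivePositions.append([row,col])
--
--     return positivePositions
--
-- def getNeighbors(row,col,matrix):
--     neighbors=[]
--     if row>0:
--         neighbors.append([row-1,col])
--     if row<len(matrix)-1:
--         neighbors.append([row+1,col])
--     if col>0:
--         neighbors.append([row,col-1])
--     if col<len(matrix[0])-1:
--         neighbors.append([row,col+1])
--     return neighbors
-- ===== SOURCE B (Python) =====
-- def convertNegatives(matrix):
--     rows = len(matrix)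
--     cols = len(matrix[0]) if matrix else 0
--     if not any(matrix[r][c] > 0 for r in range(rows) for c in range(cols)):
--         return 0
--     passes = 1
--     while True:
--         flips = [(r, c)
--                  for r in range(rows) for c in range(cols)
--                  if matrix[r][c] < 0 and any(
--                      0 <= r + dr < rows and 0 <= c + dc < cols
--                      and matrix[r + dr][c + dc] > 0
--                      for dr, dc in ((-1, 0), (1, 0), (0, -1), (0, 1)))]
--         if not flips:
--             return passes
--         for r, c in flips:
--             matrix[r][c] = -matrix[r][c]
--         passes += 1
-- ===== Notes on version B (the rewrite author's own statement) =====
-- stated objective: alternative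
-- what changed: A's multi-source BFS (a deque seeded with positives, an inner currentSize loop per level, flips pushed onto the queue) is replaced by a queue-free Bellman-Ford-style relaxation: repeated whole-matrix sweeps, each collecting and flipping every negative cell adjacent to a positive cell, counting sweeps until one finds nothing; this trades the queue for O(passes) full scans.
import Mathlib
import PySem

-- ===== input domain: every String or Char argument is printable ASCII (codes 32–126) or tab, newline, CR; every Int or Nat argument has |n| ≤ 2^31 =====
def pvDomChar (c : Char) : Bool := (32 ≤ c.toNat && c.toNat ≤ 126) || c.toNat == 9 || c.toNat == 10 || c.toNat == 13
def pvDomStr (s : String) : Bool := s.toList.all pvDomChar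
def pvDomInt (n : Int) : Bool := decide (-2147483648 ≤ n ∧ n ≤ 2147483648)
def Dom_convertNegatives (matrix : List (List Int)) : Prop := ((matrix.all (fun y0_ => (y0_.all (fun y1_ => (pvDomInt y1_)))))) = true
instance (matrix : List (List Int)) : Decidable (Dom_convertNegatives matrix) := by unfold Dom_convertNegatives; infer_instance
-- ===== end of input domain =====

-- B replaces A's multi-source BFS (deque + per-level size counter) by queue-free whole-matrix
-- sweeps, each flipping every negative cell adjacent to a positive cell (objective: alternative).
-- Both programs mutate `matrix` in place and leave it in the same final state; the theorems below
-- are about the return value.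

-- ===== PORT A =====
-- shared low-level accessors for `matrix[r][c]` reads/writes; exact for the nonnegative in-range
-- indices both programs use (their indices are provably ≥ 0, so Python's negative wraparound never fires)
def pvGet2 (m : List (List Int)) (r c : Int) : Int :=
  if 0 ≤ r ∧ 0 ≤ c then (m.getD r.toNat []).getD c.toNat 0 else 0

def pvSet2 (m : List (List Int)) (r c : Int) (v : Int) : List (List Int) :=
  m.set r.toNat ((m.getD r.toNat []).set c.toNat v)

-- len(matrix[0]); evaluated as 0 when the code guarding it never runs (matrix == [])
def pvWidth (m : List (List Int)) : Nat := (m.headD []).length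

-- number of negative entries of the matrix (termination measure only)
def pvNegAll (m : List (List Int)) : Nat :=
  (m.map (fun row => row.countP (fun x => decide (x < 0)))).sum

def getAllPositivePositions (m : List (List Int)) : List (Int × Int) :=
  (List.range m.length).foldl (fun acc (r : Nat) =>
    (List.range (pvWidth m)).foldl (fun acc2 (c : Nat) =>
      if pvGet2 m (r : Int) (c : Int) > 0 then acc2 ++ [((r : Int), (c : Int))] else acc2) acc) []

def getNeighbors (row col : Int) (m : List (List Int)) : List (Int × Int) :=
  (if row > 0 then [(row - 1, col)] else []) ++
  (if row < (m.length : Int) - 1 then [(row + 1, col)] else []) ++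
  (if col > 0 then [(row, col - 1)] else []) ++
  (if col < (pvWidth m : Int) - 1 then [(row, col + 1)] else [])

-- body of A's `for neighbor in neighbors` loop: flip a negative neighbour and append it to the queue
def pvStepA (s : List (Int × Int) × List (List Int)) (nb : Int × Int) :
    List (Int × Int) × List (List Int) :=
  let v := pvGet2 s.2 nb.1 nb.2
  if v < 0 then (s.1 ++ [nb], pvSet2 s.2 nb.1 nb.2 (-v)) else s

-- A's inner `while currentSize > 0` loop (the `[]` case is unreachable: currentSize ≤ len(queue))
def innerA : Nat → List (Int × Int) → List (List Int) → List (Int × Int) × List (List Int)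
  | 0, q, m => (q, m)
  | _ + 1, [], m => ([], m)
  | k + 1, (r, c) :: rest, m =>
      let s := (getNeighbors r c m).foldl pvStepA (rest, m)
      innerA k s.1 s.2

lemma pv_sum_split (l : List Nat) (i : Nat) (h : i < l.length) :
    l.sum = (l.take i).sum + l[i] + (l.drop (i+1)).sum := by
  conv_lhs => rw [← List.take_append_drop i l, ← List.getElem_cons_drop h]
  rw [List.sum_append, List.sum_cons]; omega

lemma pv_sum_set (l : List Nat) (i : Nat) (x : Nat) (h : i < l.length) :
    (l.set i x).sum = (l.take i).sum + x + (l.drop (i+1)).sum := by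
  rw [List.set_eq_take_cons_drop x h, List.sum_append, List.sum_cons]; omega

lemma pv_countP_split (l : List Int) (j : Nat) (p : Int → Bool) (h : j < l.length) :
    l.countP p = (l.take j).countP p + (if p l[j] then 1 else 0) + (l.drop (j+1)).countP p := by
  conv_lhs => rw [← List.take_append_drop j l, ← List.getElem_cons_drop h]
  rw [List.countP_append, List.countP_cons]; split_ifs <;> omega

lemma pv_countP_set (l : List Int) (j : Nat) (x : Int) (p : Int → Bool) (h : j < l.length) :
    (l.set j x).countP p = (l.take j).countP p + (if p x then 1 else 0) + (l.drop (j+1)).countP p := by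
  rw [List.set_eq_take_cons_drop x h, List.countP_append, List.countP_cons]; split_ifs <;> omega

-- flipping one strictly negative entry to a non-negative value removes exactly one negative
lemma pvFlip_negAll (m : List (List Int)) (r c : Int) (x : Int)
    (h : pvGet2 m r c < 0) (hx : ¬ x < 0) :
    pvNegAll (pvSet2 m r c x) + 1 = pvNegAll m := by
  unfold pvGet2 at h
  by_cases hg : 0 ≤ r ∧ 0 ≤ c
  case neg => rw [if_neg hg] at h; omega
  rw [if_pos hg] at h
  have him : r.toNat < m.length := by
    by_contra hle
    rw [List.getD_eq_default m [] (by omega : m.length ≤ r.toNat)] at h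
    simp at h
  have hrow : m.getD r.toNat [] = m[r.toNat] := List.getD_eq_getElem m [] him
  rw [hrow] at h
  have hjm : c.toNat < (m[r.toNat]'him).length := by
    by_contra hle
    rw [List.getD_eq_default (m[r.toNat]'him) 0 (by omega)] at h
    omega
  have hv : (m[r.toNat]'him)[c.toNat]'hjm < 0 := by
    rw [List.getD_eq_getElem _ _ hjm] at h; exact h
  unfold pvSet2 pvNegAll
  rw [hrow, List.map_set]
  have hfm : r.toNat < (m.map (fun row => row.countP (fun y => decide (y < 0)))).length := by
    simpa using him
  rw [pv_sum_set _ _ _ hfm, pv_sum_split _ _ hfm, List.getElem_map]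
  have hrc : ((m[r.toNat]'him).set c.toNat x).countP (fun y => decide (y < 0)) + 1
      = (m[r.toNat]'him).countP (fun y => decide (y < 0)) := by
    rw [pv_countP_set _ _ _ _ hjm, pv_countP_split _ _ _ hjm]
    have e1 : (decide ((m[r.toNat]'him)[c.toNat]'hjm < 0)) = true := decide_eq_true hv
    have e2 : (decide (x < 0)) = false := by simpa using hx
    rw [e1, e2, if_pos rfl, if_neg (by simp : ¬ false = true)]
    omega
  omega

lemma pvStepA_negAll_le (s : List (Int × Int) × List (List Int)) (nb : Int × Int) :
    pvNegAll (pvStepA s nb).2 ≤ pvNegAll s.2 := by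
  by_cases hvv : pvGet2 s.2 nb.1 nb.2 < 0
  · have := pvFlip_negAll s.2 nb.1 nb.2 (-(pvGet2 s.2 nb.1 nb.2)) hvv (by omega)
    simp only [pvStepA, if_pos hvv]
    omega
  · simp [pvStepA, hvv]

lemma pvStepA_mu (s : List (Int × Int) × List (List Int)) (nb : Int × Int) :
    (pvStepA s nb).1.length + pvNegAll (pvStepA s nb).2 = s.1.length + pvNegAll s.2 := by
  by_cases hvv : pvGet2 s.2 nb.1 nb.2 < 0
  · have := pvFlip_negAll s.2 nb.1 nb.2 (-(pvGet2 s.2 nb.1 nb.2)) hvv (by omega)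
    simp only [pvStepA, if_pos hvv, List.length_append, List.length_cons, List.length_nil]
    omega
  · simp [pvStepA, hvv]

lemma foldA_mu (l : List (Int × Int)) (s : List (Int × Int) × List (List Int)) :
    (l.foldl pvStepA s).1.length + 2 * pvNegAll (l.foldl pvStepA s).2 ≤
      s.1.length + 2 * pvNegAll s.2 := by
  induction l generalizing s with
  | nil => simp
  | cons a l ih =>
    have h1 := pvStepA_mu s a
    have h2 := pvStepA_negAll_le s a
    have h3 := ih (pvStepA s a)
    simp only [List.foldl_cons] at *
    omega

lemma innerA_mu (k : Nat) (q : List (Int × Int)) (m : List (List Int)) :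
    (innerA k q m).1.length + 2 * pvNegAll (innerA k q m).2 ≤ q.length + 2 * pvNegAll m := by
  induction k generalizing q m with
  | zero => simp [innerA]
  | succ k ih =>
    match q with
    | [] => simp [innerA]
    | (r, c) :: rest =>
      simp only [innerA]
      have h1 := foldA_mu (getNeighbors r c m) (rest, m)
      have h2 := ih ((getNeighbors r c m).foldl pvStepA (rest, m)).1
        ((getNeighbors r c m).foldl pvStepA (rest, m)).2
      dsimp only at h1 h2 ⊢
      simp only [List.length_cons] at *
      omega

lemma innerA_mu_lt (q : List (Int × Int)) (m : List (List Int)) (h : q ≠ []) :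
    (innerA q.length q m).1.length + 2 * pvNegAll (innerA q.length q m).2 <
      q.length + 2 * pvNegAll m := by
  match q with
  | (r, c) :: rest =>
    simp only [List.length_cons, innerA]
    have h1 := foldA_mu (getNeighbors r c m) (rest, m)
    have h2 := innerA_mu rest.length ((getNeighbors r c m).foldl pvStepA (rest, m)).1
      ((getNeighbors r c m).foldl pvStepA (rest, m)).2
    dsimp only at h1 h2 ⊢
    omega

-- A's outer `while queue` loop
def outerA (q : List (Int × Int)) (m : List (List Int)) (passes : Int) : Int :=
  if h : q = [] then passes
  else
    let s := innerA q.length q m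
    outerA s.1 s.2 (passes + 1)
termination_by q.length + 2 * pvNegAll m
decreasing_by exact innerA_mu_lt q m h

def convertNegatives (matrix : List (List Int)) : Int :=
  outerA (getAllPositivePositions matrix) matrix 0

-- ===== PORT B =====
def pvDirs : List (Int × Int) := [(-1, 0), (1, 0), (0, -1), (0, 1)]

-- `any(matrix[r][c] > 0 for r in range(rows) for c in range(cols))`
def pvHasPos (m : List (List Int)) (rows cols : Nat) : Bool :=
  (List.range rows).any (fun r => (List.range cols).any (fun c => decide (pvGet2 m (r : Int) (c : Int) > 0)))

-- the comprehension's condition: matrix[r][c] < 0 and any in-bounds neighbour is positive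
def pvCand (m : List (List Int)) (rows cols r c : Int) : Bool :=
  decide (pvGet2 m r c < 0) &&
  pvDirs.any (fun d => decide (0 ≤ r + d.1 ∧ r + d.1 < rows ∧ 0 ≤ c + d.2 ∧ c + d.2 < cols ∧
    0 < pvGet2 m (r + d.1) (c + d.2)))

-- the list comprehension `flips = [(r, c) for r in range(rows) for c in range(cols) if …]`
def flipsOf (m : List (List Int)) (rows cols : Nat) : List (Int × Int) :=
  (List.range rows).flatMap (fun (r : Nat) =>
    ((List.range cols).filter (fun (c : Nat) => pvCand m (rows : Int) (cols : Int) (r : Int) (c : Int))).map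
      (fun (c : Nat) => ((r : Int), (c : Int))))

-- body of B's flipping loop: matrix[r][c] = -matrix[r][c]
def pvFlip1 (mm : List (List Int)) (z : Int × Int) : List (List Int) :=
  pvSet2 mm z.1 z.2 (-(pvGet2 mm z.1 z.2))

def pvFlipAll (fl : List (Int × Int)) (m : List (List Int)) : List (List Int) :=
  fl.foldl pvFlip1 m

-- termination bookkeeping for B's `while True` loop
lemma pvGet2_neg_bounds (m : List (List Int)) (r c : Int) (h : pvGet2 m r c < 0) :
    0 ≤ r ∧ 0 ≤ c ∧ r.toNat < m.length ∧ c.toNat < (m.getD r.toNat []).length := by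
  unfold pvGet2 at h
  by_cases hg : 0 ≤ r ∧ 0 ≤ c
  case neg => rw [if_neg hg] at h; omega
  rw [if_pos hg] at h
  have him : r.toNat < m.length := by
    by_contra hle
    rw [List.getD_eq_default m [] (by omega : m.length ≤ r.toNat)] at h
    simp at h
  have hjm : c.toNat < (m.getD r.toNat []).length := by
    by_contra hle
    rw [List.getD_eq_default (m.getD r.toNat []) 0 (by omega)] at h
    omega
  exact ⟨hg.1, hg.2, him, hjm⟩

lemma pvPairNe (x y : Int × Int) (h : x ≠ y) : (x.1, x.2) ≠ (y.1, y.2) := by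
  simpa using h

lemma pvGet2_pvSet2_ne (m : List (List Int)) (r c v r' c' : Int)
    (h1 : 0 ≤ r) (h2 : 0 ≤ c) (h3 : 0 ≤ r') (h4 : 0 ≤ c')
    (hne : (r, c) ≠ (r', c')) :
    pvGet2 (pvSet2 m r c v) r' c' = pvGet2 m r' c' := by
  unfold pvGet2 pvSet2
  rw [if_pos ⟨h3, h4⟩, if_pos ⟨h3, h4⟩]
  simp only [List.getD_eq_getElem?_getD]
  by_cases hrw : r.toNat = r'.toNat
  · have hrr : r = r' := by omega
    subst hrr
    have hcn : c.toNat ≠ c'.toNat := by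
      have hcc : c ≠ c' := by
        intro hc; exact hne (by rw [hc])
      omega
    by_cases hlt : r.toNat < m.length
    · rw [List.getElem?_set_self hlt]
      simp only [Option.getD_some]
      rw [List.getElem?_set_ne hcn]
    · rw [List.set_eq_of_length_le (by omega)]
  · rw [List.getElem?_set_ne hrw]

lemma pvFlipAll_count : ∀ (l : List (Int × Int)) (m : List (List Int)),
    l.Nodup → (∀ z ∈ l, pvGet2 m z.1 z.2 < 0) →
    pvNegAll (pvFlipAll l m) + l.length = pvNegAll m := by
  intro l
  induction l with
  | nil => intro m _ _; simp [pvFlipAll]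
  | cons a l ih =>
    intro m hnd hneg
    have ha := hneg a (List.mem_cons_self)
    have hb := pvGet2_neg_bounds m a.1 a.2 ha
    have hflip := pvFlip_negAll m a.1 a.2 (-(pvGet2 m a.1 a.2)) ha (by omega)
    have hstep : pvFlipAll (a :: l) m = pvFlipAll l (pvFlip1 m a) := rfl
    have htail : ∀ z ∈ l, pvGet2 (pvFlip1 m a) z.1 z.2 < 0 := by
      intro z hz
      have hzneg := hneg z (List.mem_cons_of_mem _ hz)
      have hzb := pvGet2_neg_bounds m z.1 z.2 hzneg
      have hza : z ≠ a := by
        intro e; exact (List.nodup_cons.1 hnd).1 (e ▸ hz)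
      have : pvGet2 (pvFlip1 m a) z.1 z.2 = pvGet2 m z.1 z.2 := by
        exact pvGet2_pvSet2_ne m a.1 a.2 _ z.1 z.2 hb.1 hb.2.1 hzb.1 hzb.2.1
          (pvPairNe a z (Ne.symm hza))
      omega
    have := ih (pvFlip1 m a) (List.nodup_cons.1 hnd).2 htail
    have hlen : pvNegAll (pvFlip1 m a) + 1 = pvNegAll m := hflip
    rw [hstep]
    simp only [List.length_cons]
    omega

lemma flipsOf_mem_neg (m : List (List Int)) (rows cols : Nat) (z : Int × Int)
    (h : z ∈ flipsOf m rows cols) : pvGet2 m z.1 z.2 < 0 := by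
  simp only [flipsOf, List.mem_flatMap, List.mem_map, List.mem_filter, List.mem_range,
    pvCand, Bool.and_eq_true, decide_eq_true_eq] at h
  obtain ⟨r, _, c, ⟨_, hneg, _⟩, he⟩ := h
  rw [← he]
  exact hneg

lemma pv_nodup_flatMap_range (n : Nat) (f : Nat → List (Int × Int))
    (hf : ∀ a, (f a).Nodup)
    (hdis : ∀ a b, a ≠ b → ∀ x, x ∈ f a → x ∉ f b) :
    ((List.range n).flatMap f).Nodup := by
  induction n with
  | zero => simp
  | succ n ih =>
    rw [List.range_succ, List.flatMap_append]
    rw [List.nodup_append]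
    refine ⟨ih, by simpa using hf n, ?_⟩
    intro x hx
    simp only [List.mem_flatMap, List.mem_range] at hx
    obtain ⟨a, ha, hxa⟩ := hx
    simp only [List.flatMap_cons, List.flatMap_nil, List.append_nil]
    intro y hy e
    exact (hdis a n (by omega) x hxa) (e ▸ hy)

lemma flipsOf_nodup (m : List (List Int)) (rows cols : Nat) : (flipsOf m rows cols).Nodup := by
  unfold flipsOf
  apply pv_nodup_flatMap_range
  · intro a
    apply List.Nodup.map_on
    · intro x hx y hy he
      have : (x : Int) = (y : Int) := congrArg Prod.snd he
      omega
    · exact List.Nodup.filter _ List.nodup_range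
  · intro a b hab x hxa hxb
    simp only [List.mem_map, List.mem_filter] at hxa hxb
    obtain ⟨c1, _, he1⟩ := hxa
    obtain ⟨c2, _, he2⟩ := hxb
    have : (a : Int) = (b : Int) := (congrArg Prod.fst he1).trans (congrArg Prod.fst he2).symm
    omega

lemma pvFlipAll_flips_lt (m : List (List Int)) (rows cols : Nat)
    (h : flipsOf m rows cols ≠ []) :
    pvNegAll (pvFlipAll (flipsOf m rows cols) m) < pvNegAll m := by
  have := pvFlipAll_count (flipsOf m rows cols) m (flipsOf_nodup m rows cols)
    (fun z hz => flipsOf_mem_neg m rows cols z hz)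
  have hlen : (flipsOf m rows cols).length ≠ 0 := by
    intro e; exact h (List.length_eq_zero_iff.1 e)
  omega

-- B's `while True` loop
def sweepB (rows cols : Nat) (m : List (List Int)) (passes : Int) : Int :=
  if h : flipsOf m rows cols = [] then passes
  else sweepB rows cols (pvFlipAll (flipsOf m rows cols) m) (passes + 1)
termination_by pvNegAll m
decreasing_by exact pvFlipAll_flips_lt m rows cols h

def convertNegatives_alt (matrix : List (List Int)) : Int :=
  let rows := matrix.length
  let cols := pvWidth matrix   -- len(matrix[0]) if matrix else 0 (headD [] covers both cases)
  if pvHasPos matrix rows cols then sweepB rows cols matrix 1 else 0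

-- ===== PRECONDITION & SPEC =====
-- Pre_ excludes exactly the ragged matrices with some row shorter than row 0: there Python A
-- (and B alike) raises IndexError while scanning row by row up to len(matrix[0]).
def Pre_convertNegatives (matrix : List (List Int)) : Prop :=
  ∀ row ∈ matrix, pvWidth matrix ≤ row.length
instance (matrix : List (List Int)) : Decidable (Pre_convertNegatives matrix) := by
  unfold Pre_convertNegatives; infer_instance

def pvWitness_convertNegatives : List (List Int) := [[1, -2], [-3, 0]]

def Spec_convertNegatives (matrix : List (List Int)) (out : Int) : Prop := out = convertNegatives_alt matrix
instance (matrix : List (List Int)) (out : Int) : Decidable (Spec_convertNegatives matrix out) := by unfold Spec_convertNegatives; infer_instance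

-- ===== CLAIM (what is proved, stated in full; the proofs are below) =====
def Claim_equal_convertNegatives : Prop := ∀ (matrix : List (List Int)), Dom_convertNegatives matrix → Pre_convertNegatives matrix → Spec_convertNegatives matrix (convertNegatives matrix)

-- ===== LEMMAS AND PROOFS =====

-- in-bounds predicate
def pvInb (rows cols : Int) (x : Int × Int) : Prop :=
  0 ≤ x.1 ∧ x.1 < rows ∧ 0 ≤ x.2 ∧ x.2 < cols

-- z is a grid neighbour of some member of q
def pvAdj (q : List (Int × Int)) (z : Int × Int) (m : List (List Int)) : Prop :=
  ∃ x ∈ q, z ∈ getNeighbors x.1 x.2 m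

-- the outer-loop invariant: the queue holds distinct in-bounds positive cells, and every
-- in-bounds negative cell with an in-bounds positive neighbour is adjacent to a queue cell
def GoodQ (q : List (Int × Int)) (m : List (List Int)) : Prop :=
  q.Nodup ∧
  (∀ x ∈ q, pvInb (m.length : Int) (pvWidth m : Int) x ∧ 0 < pvGet2 m x.1 x.2) ∧
  (∀ z : Int × Int, pvInb (m.length : Int) (pvWidth m : Int) z → pvGet2 m z.1 z.2 < 0 →
    (∃ d ∈ pvDirs, pvInb (m.length : Int) (pvWidth m : Int) (z.1 + d.1, z.2 + d.2) ∧
      0 < pvGet2 m (z.1 + d.1) (z.2 + d.2)) →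
    pvAdj q z m)

-- ---- equation lemmas ----
lemma outerA_nil (m : List (List Int)) (p : Int) : outerA [] m p = p := by
  rw [outerA]; simp

lemma outerA_cons (q : List (Int × Int)) (m : List (List Int)) (p : Int) (h : q ≠ []) :
    outerA q m p = outerA (innerA q.length q m).1 (innerA q.length q m).2 (p + 1) := by
  rw [outerA]; simp [h]

lemma sweepB_nil (rows cols : Nat) (m : List (List Int)) (p : Int)
    (h : flipsOf m rows cols = []) : sweepB rows cols m p = p := by
  rw [sweepB]; simp [h]

lemma sweepB_cons (rows cols : Nat) (m : List (List Int)) (p : Int)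
    (h : flipsOf m rows cols ≠ []) :
    sweepB rows cols m p = sweepB rows cols (pvFlipAll (flipsOf m rows cols) m) (p + 1) := by
  rw [sweepB]; simp [h]

-- ---- dimension preservation ----
lemma pvSet2_length (m : List (List Int)) (r c v : Int) : (pvSet2 m r c v).length = m.length := by
  simp [pvSet2]

lemma pvSet2_width (m : List (List Int)) (r c v : Int) : pvWidth (pvSet2 m r c v) = pvWidth m := by
  match m with
  | [] => simp [pvSet2]
  | h :: t =>
    match hn : r.toNat with
    | 0 => simp [pvSet2, pvWidth, hn]
    | n + 1 => simp [pvSet2, pvWidth, hn]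

lemma pvFlipAll_length (l : List (Int × Int)) (m : List (List Int)) :
    (pvFlipAll l m).length = m.length := by
  induction l generalizing m with
  | nil => rfl
  | cons a l ih => rw [pvFlipAll, List.foldl_cons, ← pvFlipAll, ih, pvFlip1, pvSet2_length]

lemma pvFlipAll_width (l : List (Int × Int)) (m : List (List Int)) :
    pvWidth (pvFlipAll l m) = pvWidth m := by
  induction l generalizing m with
  | nil => rfl
  | cons a l ih => rw [pvFlipAll, List.foldl_cons, ← pvFlipAll, ih, pvFlip1, pvSet2_width]

lemma getNeighbors_dims (r c : Int) (m m' : List (List Int))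
    (hl : m'.length = m.length) (hw : pvWidth m' = pvWidth m) :
    getNeighbors r c m' = getNeighbors r c m := by
  unfold getNeighbors; rw [hl, hw]

lemma pvGet2_pvSet2_self (m : List (List Int)) (r c v : Int)
    (h1 : 0 ≤ r) (h2 : 0 ≤ c) (hr : r.toNat < m.length)
    (hc : c.toNat < (m.getD r.toNat []).length) :
    pvGet2 (pvSet2 m r c v) r c = v := by
  unfold pvGet2 pvSet2
  rw [if_pos ⟨h1, h2⟩]
  simp only [List.getD_eq_getElem?_getD] at hc ⊢
  rw [List.getElem?_set_self hr]
  simp only [Option.getD_some]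
  rw [List.getElem?_set_self hc]
  rfl

-- ---- pointwise description of a flip fold over distinct negative cells ----
lemma pvFlipAll_get (l : List (Int × Int)) (m : List (List Int)) (z : Int × Int)
    (hnd : l.Nodup) (hl : ∀ w ∈ l, 0 ≤ w.1 ∧ 0 ≤ w.2 ∧ pvGet2 m w.1 w.2 < 0)
    (hz : 0 ≤ z.1 ∧ 0 ≤ z.2) :
    pvGet2 (pvFlipAll l m) z.1 z.2
      = if z ∈ l then -(pvGet2 m z.1 z.2) else pvGet2 m z.1 z.2 := by
  induction l generalizing m with
  | nil => simp [pvFlipAll]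
  | cons a l ih =>
    have ha := hl a List.mem_cons_self
    have hb := pvGet2_neg_bounds m a.1 a.2 ha.2.2
    have hsa : pvGet2 (pvFlip1 m a) a.1 a.2 = -(pvGet2 m a.1 a.2) :=
      pvGet2_pvSet2_self m a.1 a.2 _ ha.1 ha.2.1 hb.2.2.1 hb.2.2.2
    have hne : ∀ w : Int × Int, w ≠ a → 0 ≤ w.1 → 0 ≤ w.2 →
        pvGet2 (pvFlip1 m a) w.1 w.2 = pvGet2 m w.1 w.2 := by
      intro w hwa hw1 hw2
      exact pvGet2_pvSet2_ne m a.1 a.2 _ w.1 w.2 ha.1 ha.2.1 hw1 hw2 (pvPairNe a w (Ne.symm hwa))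
    have htail : ∀ w ∈ l, 0 ≤ w.1 ∧ 0 ≤ w.2 ∧ pvGet2 (pvFlip1 m a) w.1 w.2 < 0 := by
      intro w hw
      have h1 := hl w (List.mem_cons_of_mem _ hw)
      have hwa : w ≠ a := by
        intro e; exact (List.nodup_cons.1 hnd).1 (e ▸ hw)
      refine ⟨h1.1, h1.2.1, ?_⟩
      rw [hne w hwa h1.1 h1.2.1]
      exact h1.2.2
    have hstep : pvFlipAll (a :: l) m = pvFlipAll l (pvFlip1 m a) := rfl
    rw [hstep, ih (pvFlip1 m a) (List.nodup_cons.1 hnd).2 htail]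
    by_cases hza : z = a
    · subst hza
      have hzl : z ∉ l := (List.nodup_cons.1 hnd).1
      rw [if_neg hzl, if_pos List.mem_cons_self, hsa]
    · rw [hne z hza hz.1 hz.2]
      by_cases hzl : z ∈ l
      · rw [if_pos hzl, if_pos (List.mem_cons_of_mem _ hzl)]
      · rw [if_neg hzl, if_neg (by simp [hza, hzl])]

-- ---- flip folds are invariant under permutation (cells are distinct, coordinates nonnegative) ----
lemma pvSet2_comm (m : List (List Int)) (r c v r' c' v' : Int)
    (h1 : 0 ≤ r) (h2 : 0 ≤ c) (h3 : 0 ≤ r') (h4 : 0 ≤ c') (hne : (r, c) ≠ (r', c')) :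
    pvSet2 (pvSet2 m r c v) r' c' v' = pvSet2 (pvSet2 m r' c' v') r c v := by
  unfold pvSet2
  by_cases hrw : r.toNat = r'.toNat
  · have hrr : r = r' := by omega
    subst hrr
    have hcn : c.toNat ≠ c'.toNat := by
      have hcc : c ≠ c' := by
        intro hc; exact hne (by rw [hc])
      omega
    by_cases hlt : r.toNat < m.length
    · simp only [List.getD_eq_getElem?_getD, List.getElem?_set_self hlt, Option.getD_some,
        List.set_set]
      rw [List.set_comm _ _ hcn]
    · have hno : ∀ x : List Int, m.set r.toNat x = m :=
        fun x => List.set_eq_of_length_le (by omega)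
      simp only [hno]
  · have h5 : ∀ x : List Int, (m.set r.toNat x).getD r'.toNat [] = m.getD r'.toNat [] := by
      intro x
      simp only [List.getD_eq_getElem?_getD]
      rw [List.getElem?_set_ne hrw]
    have h6 : ∀ x : List Int, (m.set r'.toNat x).getD r.toNat [] = m.getD r.toNat [] := by
      intro x
      simp only [List.getD_eq_getElem?_getD]
      rw [List.getElem?_set_ne (Ne.symm hrw)]
    rw [h5, h6, List.set_comm _ _ hrw]

lemma pvFlip1_comm (mm : List (List Int)) (x y : Int × Int)
    (hx : 0 ≤ x.1 ∧ 0 ≤ x.2) (hy : 0 ≤ y.1 ∧ 0 ≤ y.2) :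
    pvFlip1 (pvFlip1 mm x) y = pvFlip1 (pvFlip1 mm y) x := by
  by_cases hxy : x = y
  · rw [hxy]
  · have hne : (x.1, x.2) ≠ (y.1, y.2) := by
      intro e
      exact hxy (Prod.ext (congrArg Prod.fst e) (congrArg Prod.snd e))
    have hgx : pvGet2 (pvFlip1 mm x) y.1 y.2 = pvGet2 mm y.1 y.2 :=
      pvGet2_pvSet2_ne mm x.1 x.2 _ y.1 y.2 hx.1 hx.2 hy.1 hy.2 hne
    have hgy : pvGet2 (pvFlip1 mm y) x.1 x.2 = pvGet2 mm x.1 x.2 :=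
      pvGet2_pvSet2_ne mm y.1 y.2 _ x.1 x.2 hy.1 hy.2 hx.1 hx.2 (pvPairNe y x (Ne.symm hxy))
    show pvSet2 (pvFlip1 mm x) y.1 y.2 (-(pvGet2 (pvFlip1 mm x) y.1 y.2)) = _
    rw [hgx]
    show _ = pvSet2 (pvFlip1 mm y) x.1 x.2 (-(pvGet2 (pvFlip1 mm y) x.1 x.2))
    rw [hgy]
    exact pvSet2_comm mm x.1 x.2 _ y.1 y.2 _ hx.1 hx.2 hy.1 hy.2 hne

lemma pvFlipAll_perm (l1 l2 : List (Int × Int)) (m : List (List Int))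
    (h : l1.Perm l2) (hnn : ∀ z ∈ l1, 0 ≤ z.1 ∧ 0 ≤ z.2) :
    pvFlipAll l1 m = pvFlipAll l2 m := by
  exact List.Perm.foldl_eq' h
    (fun x hx y hy mm => pvFlip1_comm mm x y (hnn x hx) (hnn y hy)) m

-- ---- characterization of getNeighbors ----
lemma getNeighbors_nodup (r c : Int) (m : List (List Int)) : (getNeighbors r c m).Nodup := by
  unfold getNeighbors
  split_ifs <;> simp [List.nodup_cons, Prod.mk.injEq] <;> omega

lemma inb_getNeighbors (rows cols r c : Int) (m : List (List Int))
    (hr : pvInb rows cols (r, c)) (hrows : rows = (m.length : Int)) (hcols : cols = (pvWidth m : Int))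
    (x : Int × Int) (hx : x ∈ getNeighbors r c m) : pvInb rows cols x := by
  obtain ⟨hr0, hr1, hc0, hc1⟩ := hr
  obtain ⟨x1, x2⟩ := x
  simp only [getNeighbors, List.append_assoc, List.mem_append, List.mem_ite_nil_right,
    List.mem_singleton] at hx
  unfold pvInb
  rcases hx with ⟨h, he⟩ | ⟨h, he⟩ | ⟨h, he⟩ | ⟨h, he⟩ <;>
    (injection he with e1 e2; subst e1; subst e2; simp only) <;> omega

lemma mem_getNeighbors (r c : Int) (m : List (List Int)) (z : Int × Int)
    (h : pvInb (m.length : Int) (pvWidth m : Int) (r, c)) :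
    z ∈ getNeighbors r c m ↔
      pvInb (m.length : Int) (pvWidth m : Int) z ∧
        ((z.1 = r - 1 ∧ z.2 = c) ∨ (z.1 = r + 1 ∧ z.2 = c) ∨
         (z.1 = r ∧ z.2 = c - 1) ∨ (z.1 = r ∧ z.2 = c + 1)) := by
  obtain ⟨z1, z2⟩ := z
  obtain ⟨h1, h2, h3, h4⟩ := h
  simp only [getNeighbors, pvInb, List.append_assoc, List.mem_append, List.mem_ite_nil_right,
    List.mem_singleton, Prod.mk.injEq]
  constructor
  · intro hx
    rcases hx with ⟨hg, e1, e2⟩ | ⟨hg, e1, e2⟩ | ⟨hg, e1, e2⟩ | ⟨hg, e1, e2⟩ <;> omega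
  · intro hx
    omega

-- ---- characterization of A's neighbour fold and inner level loop ----
lemma foldA_char : ∀ (l : List (Int × Int)) (acc : List (Int × Int)) (m : List (List Int)),
    l.Nodup → (∀ z ∈ l, 0 ≤ z.1 ∧ 0 ≤ z.2) →
    l.foldl pvStepA (acc, m)
      = (acc ++ l.filter (fun z => decide (pvGet2 m z.1 z.2 < 0)),
         pvFlipAll (l.filter (fun z => decide (pvGet2 m z.1 z.2 < 0))) m) := by
  intro l
  induction l with
  | nil => intro acc m _ _; simp [pvFlipAll]
  | cons a l ih =>
    intro acc m hnd hnn
    have ha := hnn a List.mem_cons_self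
    rw [List.foldl_cons]
    by_cases hv : pvGet2 m a.1 a.2 < 0
    · have hstep : pvStepA (acc, m) a = (acc ++ [a], pvFlip1 m a) := by
        simp [pvStepA, pvFlip1, hv]
      rw [hstep, ih (acc ++ [a]) (pvFlip1 m a) (List.nodup_cons.1 hnd).2
        (fun z hz => hnn z (List.mem_cons_of_mem _ hz))]
      have hfilt : l.filter (fun z => decide (pvGet2 (pvFlip1 m a) z.1 z.2 < 0))
          = l.filter (fun z => decide (pvGet2 m z.1 z.2 < 0)) := by
        apply List.filter_congr
        intro z hz
        have hz' := hnn z (List.mem_cons_of_mem _ hz)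
        have hza : z ≠ a := by
          intro e; exact (List.nodup_cons.1 hnd).1 (e ▸ hz)
        have : pvGet2 (pvFlip1 m a) z.1 z.2 = pvGet2 m z.1 z.2 := by
          exact pvGet2_pvSet2_ne m a.1 a.2 _ z.1 z.2 ha.1 ha.2 hz'.1 hz'.2
            (pvPairNe a z (Ne.symm hza))
        rw [this]
      rw [hfilt]
      have hfc : (a :: l).filter (fun z => decide (pvGet2 m z.1 z.2 < 0))
          = a :: l.filter (fun z => decide (pvGet2 m z.1 z.2 < 0)) := by
        rw [List.filter_cons, if_pos (by simpa using hv)]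
      rw [hfc]
      simp only [pvFlipAll, List.foldl_cons, List.append_assoc, List.singleton_append]
    · have hstep : pvStepA (acc, m) a = (acc, m) := by simp [pvStepA, hv]
      rw [hstep, ih acc m (List.nodup_cons.1 hnd).2
        (fun z hz => hnn z (List.mem_cons_of_mem _ hz))]
      have hfc : (a :: l).filter (fun z => decide (pvGet2 m z.1 z.2 < 0))
          = l.filter (fun z => decide (pvGet2 m z.1 z.2 < 0)) := by
        rw [List.filter_cons, if_neg (by simpa using hv)]
      rw [hfc]

-- net effect of processing one dequeued cell starting from an empty out-queue
def pvNF (m : List (List Int)) (r c : Int) : List (Int × Int) × List (List Int) :=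
  (getNeighbors r c m).foldl pvStepA ([], m)

lemma stepA_shift (pre : List (Int × Int)) (s : List (Int × Int) × List (List Int)) (nb : Int × Int) :
    pvStepA (pre ++ s.1, s.2) nb = (pre ++ (pvStepA s nb).1, (pvStepA s nb).2) := by
  by_cases hv : pvGet2 s.2 nb.1 nb.2 < 0 <;> simp [pvStepA, hv]

lemma foldA_shift (l : List (Int × Int)) (pre : List (Int × Int)) (s : List (Int × Int) × List (List Int)) :
    l.foldl pvStepA (pre ++ s.1, s.2) = (pre ++ (l.foldl pvStepA s).1, (l.foldl pvStepA s).2) := by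
  induction l generalizing s with
  | nil => rfl
  | cons a l ih =>
    rw [List.foldl_cons, stepA_shift, List.foldl_cons]
    exact ih (pvStepA s a)

lemma lemA (r c : Int) (rest : List (Int × Int)) (m : List (List Int)) :
    (getNeighbors r c m).foldl pvStepA (rest, m) = (rest ++ (pvNF m r c).1, (pvNF m r c).2) := by
  have h := foldA_shift (getNeighbors r c m) rest ([], m)
  simpa [pvNF] using h

lemma innerA_pop (r c : Int) (q1' q2 : List (Int × Int)) (m : List (List Int)) :
    innerA ((r, c) :: q1').length ((r, c) :: q1' ++ q2) m
      = innerA q1'.length (q1' ++ (q2 ++ (pvNF m r c).1)) (pvNF m r c).2 := by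
  show innerA (q1'.length + 1) ((r, c) :: (q1' ++ q2)) m = _
  simp only [innerA]
  rw [lemA]
  simp [List.append_assoc]

-- A's inner loop on the whole queue: it appends a duplicate-free list F of in-bounds cells that
-- are negative and adjacent to the queue, flips exactly those, and F contains every such cell
lemma innerA_char : ∀ (q1 q2 : List (Int × Int)) (m : List (List Int)),
    (∀ x ∈ q1, pvInb (m.length : Int) (pvWidth m : Int) x) →
    ∃ F, innerA q1.length (q1 ++ q2) m = (q2 ++ F, pvFlipAll F m) ∧
      F.Nodup ∧
      (∀ z ∈ F, pvInb (m.length : Int) (pvWidth m : Int) z ∧ pvGet2 m z.1 z.2 < 0 ∧ pvAdj q1 z m) ∧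
      (∀ z, pvGet2 m z.1 z.2 < 0 → pvAdj q1 z m → z ∈ F) := by
  intro q1
  induction q1 with
  | nil =>
    intro q2 m _
    refine ⟨[], by simp [innerA, pvFlipAll], by simp, by simp, ?_⟩
    intro z _ hadj
    obtain ⟨x, hx, _⟩ := hadj
    simp at hx
  | cons x q1' ih =>
    intro q2 m hinb
    obtain ⟨r, c⟩ := x
    have hx := hinb (r, c) List.mem_cons_self
    have hnbnn : ∀ z ∈ getNeighbors r c m, 0 ≤ z.1 ∧ 0 ≤ z.2 := by
      intro z hz
      have := inb_getNeighbors (m.length : Int) (pvWidth m : Int) r c m hx rfl rfl z hz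
      exact ⟨this.1, this.2.2.1⟩
    have hNF := foldA_char (getNeighbors r c m) [] m (getNeighbors_nodup r c m) hnbnn
    set F1 := (getNeighbors r c m).filter (fun z => decide (pvGet2 m z.1 z.2 < 0)) with hF1
    have hNF' : pvNF m r c = (F1, pvFlipAll F1 m) := by
      rw [pvNF, hNF]; simp
    set m1 := pvFlipAll F1 m with hm1
    have hF1nd : F1.Nodup := List.Nodup.filter _ (getNeighbors_nodup r c m)
    have hF1prop : ∀ z ∈ F1, pvInb (m.length : Int) (pvWidth m : Int) z ∧ pvGet2 m z.1 z.2 < 0 := by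
      intro z hz
      rw [hF1] at hz
      have hz1 := List.mem_of_mem_filter hz
      have hz2 := List.of_mem_filter hz
      exact ⟨inb_getNeighbors _ _ r c m hx rfl rfl z hz1, by simpa using hz2⟩
    have hF1nn : ∀ z ∈ F1, 0 ≤ z.1 ∧ 0 ≤ z.2 ∧ pvGet2 m z.1 z.2 < 0 := by
      intro z hz
      have := hF1prop z hz
      exact ⟨this.1.1, this.1.2.2.1, this.2⟩
    have hm1len : m1.length = m.length := pvFlipAll_length _ _
    have hm1w : pvWidth m1 = pvWidth m := pvFlipAll_width _ _
    have hget1 : ∀ z : Int × Int, 0 ≤ z.1 → 0 ≤ z.2 →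
        pvGet2 m1 z.1 z.2 = if z ∈ F1 then -(pvGet2 m z.1 z.2) else pvGet2 m z.1 z.2 := by
      intro z h1 h2
      exact pvFlipAll_get F1 m z hF1nd (fun w hw => hF1nn w hw) ⟨h1, h2⟩
    have hgn1 : ∀ (a b : Int), getNeighbors a b m1 = getNeighbors a b m :=
      fun a b => getNeighbors_dims a b m m1 hm1len hm1w
    have hinb' : ∀ y ∈ q1', pvInb (m1.length : Int) (pvWidth m1 : Int) y := by
      intro y hy
      rw [hm1len, hm1w]
      exact hinb y (List.mem_cons_of_mem _ hy)
    obtain ⟨F', hres', hnd', hmem', hback'⟩ := ih (q2 ++ F1) m1 hinb'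
    refine ⟨F1 ++ F', ?_, ?_, ?_, ?_⟩
    · rw [innerA_pop r c q1' q2 m, hNF']
      rw [hres']
      simp only [List.append_assoc, pvFlipAll, List.foldl_append, Prod.mk.injEq, true_and]
      rw [hm1]
      rfl
    · rw [List.nodup_append]
      refine ⟨hF1nd, hnd', ?_⟩
      intro z hz1 w hw e
      rw [← e] at hw
      have hzf := hF1prop z hz1
      have hzm := hmem' z hw
      have : pvGet2 m1 z.1 z.2 = -(pvGet2 m z.1 z.2) := by
        rw [hget1 z hzf.1.1 hzf.1.2.2.1, if_pos hz1]
      omega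
    · intro z hz
      rcases List.mem_append.1 hz with hz1 | hz2
      · have hzf := hF1prop z hz1
        refine ⟨hzf.1, hzf.2, (r, c), List.mem_cons_self, ?_⟩
        exact List.mem_of_mem_filter hz1
      · have hzm := hmem' z hz2
        have hzinb : pvInb (m.length : Int) (pvWidth m : Int) z := by
          have := hzm.1; rwa [hm1len, hm1w] at this
        have hz1 : z ∉ F1 := by
          intro hzin
          have hzf := hF1prop z hzin
          have : pvGet2 m1 z.1 z.2 = -(pvGet2 m z.1 z.2) := by
            rw [hget1 z hzf.1.1 hzf.1.2.2.1, if_pos hzin]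
          have := hzm.2.1
          omega
        have hgz : pvGet2 m z.1 z.2 < 0 := by
          have := hzm.2.1
          rw [hget1 z hzinb.1 hzinb.2.2.1, if_neg hz1] at this
          exact this
        refine ⟨hzinb, hgz, ?_⟩
        obtain ⟨y, hy, hzy⟩ := hzm.2.2
        exact ⟨y, List.mem_cons_of_mem _ hy, by rwa [hgn1] at hzy⟩
    · intro z hgz hadj
      obtain ⟨y, hy, hzy⟩ := hadj
      rcases List.mem_cons.1 hy with hyh | hyt
      · subst hyh
        apply List.mem_append_left
        rw [hF1]
        exact List.mem_filter.2 ⟨hzy, by simpa using hgz⟩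
      · by_cases hz1 : z ∈ F1
        · exact List.mem_append_left _ hz1
        · apply List.mem_append_right
          have hzinb : pvInb (m.length : Int) (pvWidth m : Int) z :=
            inb_getNeighbors _ _ y.1 y.2 m (by
              have := hinb y (List.mem_cons_of_mem _ hyt)
              exact this) rfl rfl z hzy
          apply hback' z
          · rw [hget1 z hzinb.1 hzinb.2.2.1, if_neg hz1]
            exact hgz
          · exact ⟨y, hyt, by rwa [hgn1]⟩

-- ---- flipsOf membership ----
lemma mem_flipsOf (m : List (List Int)) (z : Int × Int) :
    z ∈ flipsOf m m.length (pvWidth m) ↔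
      pvInb (m.length : Int) (pvWidth m : Int) z ∧ pvGet2 m z.1 z.2 < 0 ∧
        ∃ d ∈ pvDirs, pvInb (m.length : Int) (pvWidth m : Int) (z.1 + d.1, z.2 + d.2) ∧
          0 < pvGet2 m (z.1 + d.1) (z.2 + d.2) := by
  obtain ⟨z1, z2⟩ := z
  simp only [flipsOf, List.mem_flatMap, List.mem_map, List.mem_filter, List.mem_range,
    pvCand, Bool.and_eq_true, decide_eq_true_eq, List.any_eq_true, pvInb, Prod.mk.injEq]
  constructor
  · rintro ⟨r, hr, c, ⟨hc, hneg, d, hd, hcond⟩, e1, e2⟩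
    subst e1; subst e2
    refine ⟨⟨by omega, by omega, by omega, by omega⟩, hneg, d, hd, ?_⟩
    exact ⟨⟨hcond.1, hcond.2.1, hcond.2.2.1, hcond.2.2.2.1⟩, hcond.2.2.2.2⟩
  · rintro ⟨⟨h1, h2, h3, h4⟩, hneg, d, hd, ⟨hi1, hi2, hi3, hi4⟩, hpos⟩
    have e1 : ((z1.toNat : Nat) : Int) = z1 := by omega
    have e2 : ((z2.toNat : Nat) : Int) = z2 := by omega
    refine ⟨z1.toNat, by omega, z2.toNat, ⟨by omega, ?_, d, hd, ?_⟩, e1, e2⟩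
    · rw [e1, e2]; exact hneg
    · rw [e1, e2]
      exact ⟨hi1, hi2, hi3, hi4, hpos⟩

-- ---- the seed scan ----
lemma seedsA_flat (m : List (List Int)) :
    getAllPositivePositions m = (List.range m.length).flatMap (fun (r : Nat) =>
      ((List.range (pvWidth m)).filter (fun (c : Nat) => decide (pvGet2 m (r : Int) (c : Int) > 0))).map
        (fun (c : Nat) => ((r : Int), (c : Int)))) := by
  unfold getAllPositivePositions
  have hfun : (fun (acc : List (Int × Int)) (r : Nat) =>
      (List.range (pvWidth m)).foldl (fun (acc2 : List (Int × Int)) (c : Nat) =>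
        if pvGet2 m (r : Int) (c : Int) > 0 then acc2 ++ [((r : Int), (c : Int))] else acc2) acc)
      = (fun acc (r : Nat) => acc ++
        ((List.range (pvWidth m)).filter (fun (c : Nat) => decide (pvGet2 m (r : Int) (c : Int) > 0))).map
          (fun (c : Nat) => ((r : Int), (c : Int)))) := by
    funext acc r
    have h := PySem.List.foldl_append_if (fun c : Nat => decide (pvGet2 m (r : Int) (c : Int) > 0))
      (fun c : Nat => ((r : Int), (c : Int))) (List.range (pvWidth m)) acc
    simpa using h
  rw [hfun, PySem.List.foldl_append_eq_flatMap]
  simp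

lemma mem_seeds (m : List (List Int)) (z : Int × Int) :
    z ∈ getAllPositivePositions m ↔
      pvInb (m.length : Int) (pvWidth m : Int) z ∧ 0 < pvGet2 m z.1 z.2 := by
  obtain ⟨z1, z2⟩ := z
  rw [seedsA_flat]
  simp only [List.mem_flatMap, List.mem_map, List.mem_filter, List.mem_range,
    decide_eq_true_eq, pvInb, Prod.mk.injEq]
  constructor
  · rintro ⟨r, hr, c, ⟨hc, hpos⟩, e1, e2⟩
    subst e1; subst e2
    exact ⟨⟨by omega, by omega, by omega, by omega⟩, hpos⟩
  · rintro ⟨⟨h1, h2, h3, h4⟩, hpos⟩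
    have e1 : ((z1.toNat : Nat) : Int) = z1 := by omega
    have e2 : ((z2.toNat : Nat) : Int) = z2 := by omega
    refine ⟨z1.toNat, by omega, z2.toNat, ⟨by omega, ?_⟩, e1, e2⟩
    rw [e1, e2]; exact hpos

lemma seeds_nodup (m : List (List Int)) : (getAllPositivePositions m).Nodup := by
  rw [seedsA_flat]
  apply pv_nodup_flatMap_range
  · intro a
    apply List.Nodup.map_on
    · intro x hx y hy he
      have : (x : Int) = (y : Int) := congrArg Prod.snd he
      omega
    · exact List.Nodup.filter _ List.nodup_range
  · intro a b hab x hxa hxb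
    simp only [List.mem_map, List.mem_filter] at hxa hxb
    obtain ⟨c1, _, he1⟩ := hxa
    obtain ⟨c2, _, he2⟩ := hxb
    have : (a : Int) = (b : Int) := (congrArg Prod.fst he1).trans (congrArg Prod.fst he2).symm
    omega

lemma hasPos_iff (m : List (List Int)) :
    pvHasPos m m.length (pvWidth m) = true ↔ getAllPositivePositions m ≠ [] := by
  rw [Ne, List.eq_nil_iff_forall_not_mem]
  simp only [pvHasPos, List.any_eq_true, List.mem_range, decide_eq_true_eq]
  constructor
  · rintro ⟨r, hr, c, hc, hpos⟩ hnone
    exact hnone ((r : Int), (c : Int)) ((mem_seeds m _).2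
      ⟨⟨by omega, by omega, by omega, by omega⟩, hpos⟩)
  · intro h
    by_contra hno
    push_neg at hno
    apply h
    intro z hz
    obtain ⟨⟨h1, h2, h3, h4⟩, hpos⟩ := (mem_seeds m z).1 hz
    have e1 : ((z.1.toNat : Nat) : Int) = z.1 := by omega
    have e2 : ((z.2.toNat : Nat) : Int) = z.2 := by omega
    have := hno z.1.toNat (by omega) z.2.toNat (by omega)
    rw [e1, e2] at this
    omega

-- ---- initial invariant ----
lemma seeds_good (m : List (List Int)) : GoodQ (getAllPositivePositions m) m := by
  refine ⟨seeds_nodup m, ?_, ?_⟩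
  · intro x hx
    exact (mem_seeds m x).1 hx
  · intro z hz hneg ⟨d, hd, hinb, hpos⟩
    refine ⟨(z.1 + d.1, z.2 + d.2), (mem_seeds m _).2 ⟨hinb, hpos⟩, ?_⟩
    rw [mem_getNeighbors _ _ m z hinb]
    refine ⟨hz, ?_⟩
    simp only [pvDirs, List.mem_cons, List.not_mem_nil, or_false] at hd
    rcases hd with rfl | rfl | rfl | rfl <;> simp

-- ---- one level of A equals one sweep of B ----
lemma level_eq (Q : List (Int × Int)) (m : List (List Int)) (hG : GoodQ Q m) :
    ∃ F, innerA Q.length Q m = (F, pvFlipAll F m) ∧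
      F.Perm (flipsOf m m.length (pvWidth m)) ∧
      (∀ z ∈ F, 0 ≤ z.1 ∧ 0 ≤ z.2) ∧
      GoodQ F (pvFlipAll F m) := by
  obtain ⟨hnd, hmem, hcov⟩ := hG
  obtain ⟨F, hres, hFnd, hFmem, hFback⟩ := innerA_char Q [] m (fun x hx => (hmem x hx).1)
  rw [List.append_nil] at hres
  simp only [List.nil_append] at hres
  have hFnn : ∀ z ∈ F, 0 ≤ z.1 ∧ 0 ≤ z.2 := by
    intro z hz
    have := (hFmem z hz).1
    exact ⟨this.1, this.2.2.1⟩
  have hFiff : ∀ z, z ∈ F ↔ z ∈ flipsOf m m.length (pvWidth m) := by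
    intro z
    rw [mem_flipsOf]
    constructor
    · intro hz
      obtain ⟨hzinb, hzneg, x, hxQ, hzx⟩ := hFmem z hz
      have hxm := hmem x hxQ
      refine ⟨hzinb, hzneg, ?_⟩
      obtain ⟨x1, x2⟩ := x
      rw [mem_getNeighbors x1 x2 m z hxm.1] at hzx
      rcases hzx.2 with ⟨e1, e2⟩ | ⟨e1, e2⟩ | ⟨e1, e2⟩ | ⟨e1, e2⟩
      · refine ⟨(1, 0), by simp [pvDirs], ?_, ?_⟩
        · have : (z.1 + 1, z.2 + 0) = (x1, x2) := by
            rw [Prod.mk.injEq]; omega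
          rw [this]; exact hxm.1
        · have e3 : z.1 + 1 = x1 := by omega
          have e4 : z.2 + 0 = x2 := by omega
          rw [e3, e4]; exact hxm.2
      · refine ⟨(-1, 0), by simp [pvDirs], ?_, ?_⟩
        · have : (z.1 + -1, z.2 + 0) = (x1, x2) := by
            rw [Prod.mk.injEq]; omega
          rw [this]; exact hxm.1
        · have e3 : z.1 + -1 = x1 := by omega
          have e4 : z.2 + 0 = x2 := by omega
          rw [e3, e4]; exact hxm.2
      · refine ⟨(0, 1), by simp [pvDirs], ?_, ?_⟩
        · have : (z.1 + 0, z.2 + 1) = (x1, x2) := by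
            rw [Prod.mk.injEq]; omega
          rw [this]; exact hxm.1
        · have e3 : z.1 + 0 = x1 := by omega
          have e4 : z.2 + 1 = x2 := by omega
          rw [e3, e4]; exact hxm.2
      · refine ⟨(0, -1), by simp [pvDirs], ?_, ?_⟩
        · have : (z.1 + 0, z.2 + -1) = (x1, x2) := by
            rw [Prod.mk.injEq]; omega
          rw [this]; exact hxm.1
        · have e3 : z.1 + 0 = x1 := by omega
          have e4 : z.2 + -1 = x2 := by omega
          rw [e3, e4]; exact hxm.2
    · rintro ⟨hzinb, hzneg, hd⟩
      exact hFback z hzneg (hcov z hzinb hzneg hd)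
  have hperm : F.Perm (flipsOf m m.length (pvWidth m)) :=
    (List.perm_ext_iff_of_nodup hFnd (flipsOf_nodup m _ _)).2 hFiff
  refine ⟨F, hres, hperm, hFnn, ?_⟩
  -- the flipped cells form a Good queue for the flipped matrix
  have hm'len : (pvFlipAll F m).length = m.length := pvFlipAll_length _ _
  have hm'w : pvWidth (pvFlipAll F m) = pvWidth m := pvFlipAll_width _ _
  have hget : ∀ z : Int × Int, 0 ≤ z.1 → 0 ≤ z.2 →
      pvGet2 (pvFlipAll F m) z.1 z.2
        = if z ∈ F then -(pvGet2 m z.1 z.2) else pvGet2 m z.1 z.2 := by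
    intro z h1 h2
    exact pvFlipAll_get F m z hFnd
      (fun w hw => ⟨(hFnn w hw).1, (hFnn w hw).2, (hFmem w hw).2.1⟩) ⟨h1, h2⟩
  refine ⟨hFnd, ?_, ?_⟩
  · intro x hx
    have hxm := hFmem x hx
    constructor
    · rw [hm'len, hm'w]; exact hxm.1
    · rw [hget x hxm.1.1 hxm.1.2.2.1, if_pos hx]
      have := hxm.2.1
      omega
  · intro z hzinb hzneg ⟨d, hd, hdinb, hdpos⟩
    rw [hm'len, hm'w] at hzinb hdinb
    have hzF : z ∉ F := by
      intro hzin
      have := hget z hzinb.1 hzinb.2.2.1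
      rw [if_pos hzin] at this
      have h2 := (hFmem z hzin).2.1
      omega
    have hzneg' : pvGet2 m z.1 z.2 < 0 := by
      have := hget z hzinb.1 hzinb.2.2.1
      rw [if_neg hzF] at this
      omega
    by_cases hyF : (z.1 + d.1, z.2 + d.2) ∈ F
    · refine ⟨(z.1 + d.1, z.2 + d.2), hyF, ?_⟩
      have hyinb := (hFmem _ hyF).1
      rw [mem_getNeighbors (z.1 + d.1) (z.2 + d.2) (pvFlipAll F m) z (by
        rw [hm'len, hm'w]; exact hyinb)]
      refine ⟨by rw [hm'len, hm'w]; exact hzinb, ?_⟩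
      simp only [pvDirs, List.mem_cons, List.not_mem_nil, or_false] at hd
      rcases hd with rfl | rfl | rfl | rfl <;> simp
    · exfalso
      have hypos : 0 < pvGet2 m (z.1 + d.1) (z.2 + d.2) := by
        have := hget (z.1 + d.1, z.2 + d.2) hdinb.1 hdinb.2.2.1
        rw [if_neg hyF] at this
        simp only at this
        omega
      have := hcov z hzinb hzneg' ⟨d, hd, hdinb, hypos⟩
      exact hzF (hFback z hzneg' this)

-- ---- the outer loop equals the sweep loop ----
lemma main_eq : ∀ (N : Nat) (m : List (List Int)) (Q : List (Int × Int)) (p : Int),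
    pvNegAll m ≤ N → Q ≠ [] → GoodQ Q m →
    outerA Q m p = sweepB m.length (pvWidth m) m (p + 1) := by
  intro N
  induction N with
  | zero =>
    intro m Q p hN hne hG
    obtain ⟨F, hres, hperm, hFnn, hG'⟩ := level_eq Q m hG
    have hFempty : F = [] := by
      by_contra hFne
      obtain ⟨z, hz⟩ := List.exists_mem_of_ne_nil F hFne
      have hneg := ((innerA_char Q [] m (fun x hx => (hG.2.1 x hx).1)).choose_spec)
      -- derive emptiness from the measure instead
      have hcount := pvFlipAll_count F m
        (by
          obtain ⟨_, _, hFmem, _⟩ := hneg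
          exact List.Perm.nodup_iff hperm |>.2 (flipsOf_nodup m _ _))
        (fun w hw => flipsOf_mem_neg m _ _ w (hperm.subset hw))
      have : F.length = 0 := by omega
      exact hFne (List.length_eq_zero_iff.1 this)
    subst hFempty
    rw [outerA_cons Q m p hne, hres]
    simp only [pvFlipAll, List.foldl_nil]
    rw [outerA_nil, sweepB_nil]
    rw [← List.Perm.eq_nil (hperm.symm)]
  | succ N ih =>
    intro m Q p hN hne hG
    obtain ⟨F, hres, hperm, hFnn, hG'⟩ := level_eq Q m hG
    have hFnd : F.Nodup := List.Perm.nodup_iff hperm |>.2 (flipsOf_nodup m _ _)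
    have hFneg : ∀ w ∈ F, pvGet2 m w.1 w.2 < 0 :=
      fun w hw => flipsOf_mem_neg m _ _ w (hperm.subset hw)
    rw [outerA_cons Q m p hne, hres]
    by_cases hFe : F = []
    · subst hFe
      simp only [pvFlipAll, List.foldl_nil]
      rw [outerA_nil, sweepB_nil]
      rw [← List.Perm.eq_nil (hperm.symm)]
    · have hflne : flipsOf m m.length (pvWidth m) ≠ [] := by
        intro he
        exact hFe (List.Perm.eq_nil (he ▸ hperm))
      rw [sweepB_cons _ _ _ _ hflne]
      have hmeq : pvFlipAll (flipsOf m m.length (pvWidth m)) m = pvFlipAll F m :=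
        (pvFlipAll_perm F _ m hperm hFnn).symm
      rw [hmeq]
      have hcount := pvFlipAll_count F m hFnd hFneg
      have hFlen : F.length ≠ 0 := by
        intro e; exact hFe (List.length_eq_zero_iff.1 e)
      have hIH := ih (pvFlipAll F m) F (p + 1) (by omega) hFe hG'
      rw [hIH, pvFlipAll_length, pvFlipAll_width]

-- ===== VERDICT (by name: the statement is the Claim_ definition above) =====
theorem convertNegatives_spec : Claim_equal_convertNegatives := by
  unfold Claim_equal_convertNegatives
  intro matrix _ _
  unfold Spec_convertNegatives convertNegatives convertNegatives_alt
  by_cases hpos : pvHasPos matrix matrix.length (pvWidth matrix) = true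
  · simp only [hpos, if_true]
    have hne := (hasPos_iff matrix).1 hpos
    have := main_eq (pvNegAll matrix) matrix (getAllPositivePositions matrix) 0
      (le_refl _) hne (seeds_good matrix)
    simpa using this
  · have hnil : getAllPositivePositions matrix = [] := by
      by_contra h
      exact hpos ((hasPos_iff matrix).2 h)
    rw [hnil, outerA_nil]
    simp [hpos]
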